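-- pv_equiv track=rewrite | github.com/shengy915/ntu | sc1003 practice/week_11.py | binary2
-- ===== SOURCE A (Python) =====
-- def binary2(n,c):
--     def binary2_helper(n,c, prefix = ""):
--         if n == 0:
--             return [prefix]
--         else:
--             result = []
--             ones = len([n for n in prefix if n == "1"])
--             if prefix == "" or ones < c:
--                 result.extend(binary2_helper(n-1, c, prefix + "1"))
--             result.extend(binary2_helper(n-1, c, prefix + "0"))
--             return result
--
--     return binary2_helper(n,c)
-- ===== SOURCE B (Python) =====
-- def binary2(n, c):
--     # Breadth-first level construction: extend all prefixes one character at a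
--     # time, carrying the ones-count, instead of depth-first recursion.
--     def children(p, ones):
--         if p == "" or ones < c:
--             yield p + "1", ones + 1
--         yield p + "0", ones
--     level = [("", 0)]
--     for _ in range(n):
--         level = [child for po in level for child in children(*po)]
--     return [p for p, _ in level]
-- ===== Notes on version B (the rewrite author's own statement) =====
-- stated objective: alternative
-- what changed: Replaces the depth-first recursion with an iterative breadth-first level construction that extends every prefix by one character per round and carries the ones-count in the tuple instead of rescanning the prefix; Pre_ excludes n < 0, where A exceeds the recursion limit (RecursionError).
import Mathlib
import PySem

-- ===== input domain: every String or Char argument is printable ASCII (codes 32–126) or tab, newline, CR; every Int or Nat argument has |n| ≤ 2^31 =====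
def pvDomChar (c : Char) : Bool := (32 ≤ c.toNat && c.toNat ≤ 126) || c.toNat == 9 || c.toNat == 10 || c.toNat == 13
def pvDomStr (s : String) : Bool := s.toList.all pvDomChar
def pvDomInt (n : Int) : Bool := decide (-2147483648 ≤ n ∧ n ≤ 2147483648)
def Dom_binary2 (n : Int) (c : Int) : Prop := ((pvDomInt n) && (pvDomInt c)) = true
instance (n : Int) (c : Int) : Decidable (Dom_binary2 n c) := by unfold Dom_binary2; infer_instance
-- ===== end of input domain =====

-- B replaces A's depth-first recursion by an iterative breadth-first level construction
-- carrying the ones-count (objective: alternative, same enumeration cost).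


-- ===== PORT A =====
-- pfx is modelled as List Char; Python string concatenation/equality/len are exact on it.
-- The recursion is on the Nat value of n (Pre_ restricts to n ≥ 0, where A terminates).
def binary2Helper (n : Nat) (c : Int) (pfx : List Char) : List String :=
  match n with
  | 0 => [String.ofList pfx]
  | Nat.succ m =>
    let ones : Int := ((pfx.filter (fun ch => ch == '1')).length : Int)
    (if pfx = [] ∨ ones < c then binary2Helper m c (pfx ++ ['1']) else [])
      ++ binary2Helper m c (pfx ++ ['0'])

def binary2 (n : Int) (c : Int) : List String :=
  binary2Helper n.toNat c []

-- ===== PORT B =====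
-- children of one (prefix, ones) pair, in emission order ('yield' order of Source B)
def binary2Children (c : Int) (po : List Char × Int) : List (List Char × Int) :=
  (if po.1 = [] ∨ po.2 < c then [(po.1 ++ ['1'], po.2 + 1)] else []) ++ [(po.1 ++ ['0'], po.2)]

def binary2_alt (n : Int) (c : Int) : List String :=
  let level := (List.range n.toNat).foldl
    (fun lvl _ => lvl.flatMap (binary2Children c)) [(([] : List Char), (0 : Int))]
  level.map (fun po => String.ofList po.1)

-- ===== PRECONDITION & SPEC =====
-- Pre_ excludes n < 0, on which Python A recurses without a base case and raises RecursionError.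
def Pre_binary2 (n : Int) (c : Int) : Prop := 0 ≤ n
instance (n : Int) (c : Int) : Decidable (Pre_binary2 n c) := by unfold Pre_binary2; infer_instance
def pvWitness_binary2 : Int × Int := (3, 1)
def Spec_binary2 (n : Int) (c : Int) (out : List String) : Prop := out = binary2_alt n c
instance (n : Int) (c : Int) (out : List String) : Decidable (Spec_binary2 n c out) := by unfold Spec_binary2; infer_instance

-- ===== CLAIM (what is proved, stated in full; the proofs are below) =====
def Claim_equal_binary2 : Prop := ∀ (n : Int) (c : Int), Dom_binary2 n c → Pre_binary2 n c → Spec_binary2 n c (binary2 n c)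

-- ===== LEMMAS AND PROOFS =====

def onesCount (p : List Char) : Int := ((p.filter (fun ch => ch == '1')).length : Int)

theorem onesCount_append_one (p : List Char) : onesCount (p ++ ['1']) = onesCount p + 1 := by
  simp [onesCount, List.filter_append]

theorem onesCount_append_zero (p : List Char) : onesCount (p ++ ['0']) = onesCount p := by
  simp [onesCount, List.filter_append]

-- the index-ignoring foldl over range k is k-fold iteration
theorem foldl_range_const {α : Type} (g : α → α) (k : Nat) (a : α) :
    (List.range k).foldl (fun x _ => g x) a = g^[k] a := by
  induction k generalizing a with
  | zero => simp
  | succ m ih =>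
    rw [List.range_succ_eq_map]
    simp only [List.foldl_cons, List.foldl_map]
    rw [ih (g a), Function.iterate_succ_apply]

-- BFS from a level whose ones-counts are correct computes the DFS leaves, in order
theorem bfs_eq_dfs (c : Int) (k : Nat) (lvl : List (List Char × Int))
    (h : ∀ po ∈ lvl, po.2 = onesCount po.1) :
    ((fun lv => lv.flatMap (binary2Children c))^[k] lvl).map (fun po => String.ofList po.1)
      = lvl.flatMap (fun po => binary2Helper k c po.1) := by
  induction k generalizing lvl with
  | zero => rw [List.map_eq_flatMap]; rfl
  | succ m ih =>
    rw [Function.iterate_succ_apply]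
    rw [ih (lvl.flatMap (binary2Children c)) ?inv]
    · rw [List.flatMap_assoc]
      refine List.flatMap_congr (fun po hpo => ?_)
      have ho := h po hpo
      simp only [binary2Children, List.flatMap_append, List.flatMap_cons, List.flatMap_nil, List.append_nil]
      by_cases hc : po.1 = [] ∨ po.2 < c
      · simp only [if_pos hc]
        rw [show binary2Helper (m + 1) c po.1 =
          (if po.1 = [] ∨ ((po.1.filter (fun ch => ch == '1')).length : Int) < c
            then binary2Helper m c (po.1 ++ ['1']) else []) ++ binary2Helper m c (po.1 ++ ['0']) from rfl]
        rw [if_pos (by rw [← onesCount, ← ho]; exact hc)]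
        simp [List.flatMap_cons]
      · simp only [if_neg hc]
        rw [show binary2Helper (m + 1) c po.1 =
          (if po.1 = [] ∨ ((po.1.filter (fun ch => ch == '1')).length : Int) < c
            then binary2Helper m c (po.1 ++ ['1']) else []) ++ binary2Helper m c (po.1 ++ ['0']) from rfl]
        rw [if_neg (by rw [← onesCount, ← ho]; exact hc)]
        simp
    case inv =>
      intro po hpo
      simp only [List.mem_flatMap] at hpo
      obtain ⟨q, hq, hmem⟩ := hpo
      have hq2 := h q hq
      unfold binary2Children at hmem
      rcases List.mem_append.mp hmem with h1 | h0
      · split at h1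
        · rcases List.mem_singleton.mp h1 with rfl
          simp [onesCount_append_one, hq2]
        · exact absurd h1 (List.not_mem_nil)
      · rcases List.mem_singleton.mp h0 with rfl
        simp [onesCount_append_zero, hq2]

-- ===== VERDICT (by name: the statement is the Claim_ definition above) =====
theorem binary2_spec : Claim_equal_binary2 := by
  intro n c _ _
  unfold Spec_binary2 binary2 binary2_alt
  rw [foldl_range_const]
  rw [bfs_eq_dfs c n.toNat [(([] : List Char), (0 : Int))] (by intro po hpo; simp at hpo; simp [hpo, onesCount])]
  simp
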